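-- pv_equiv track=rewrite | github.com/soji-omiwade/algorithms | dsa/before_rubrik/duplicate_chars_removal.py | go
-- ===== SOURCE A (Python) =====
-- def go(s):
--     s = list(s)
--     instring = False
--     loc = 0
--     for i in range(len(s)):
--         if ord(s[i]) >= ord("A") and  ord(s[i]) <= ord("z"):
--             if not instring:
--                 s[loc] = s[i]
--                 loc += 1
--             instring = True
--         else:
--             instring = False
--     return " ".join(s[:loc])
-- ===== SOURCE B (Python) =====
-- def go(s):
--     out = []
--     i = 0
--     n = len(s)
--     while i < n:
--         if "A" <= s[i] <= "z":
--             out.append(s[i])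
--             while i < n and "A" <= s[i] <= "z":
--                 i += 1
--         else:
--             while i < n and not ("A" <= s[i] <= "z"):
--                 i += 1
--     return " ".join(out)
-- ===== Notes on version B (the rewrite author's own statement) =====
-- stated objective: simpler
-- what changed: Replaces the flag-tracking scan that mutates the list in place with a run-skipping scan: find each maximal run of alphabetic-range characters, take its first character, and skip the rest of the run.
import Mathlib
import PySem

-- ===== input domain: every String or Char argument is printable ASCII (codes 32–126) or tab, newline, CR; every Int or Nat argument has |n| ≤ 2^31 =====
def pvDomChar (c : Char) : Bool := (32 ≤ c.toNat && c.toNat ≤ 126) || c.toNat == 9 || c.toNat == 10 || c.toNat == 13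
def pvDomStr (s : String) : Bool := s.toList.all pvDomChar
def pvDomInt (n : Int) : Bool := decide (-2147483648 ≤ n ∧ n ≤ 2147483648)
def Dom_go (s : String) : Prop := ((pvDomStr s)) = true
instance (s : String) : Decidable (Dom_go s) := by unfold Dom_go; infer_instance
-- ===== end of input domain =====

-- Header: B replaces A's in-place flag-tracking scan with a run-skipping scan
-- (first char of each maximal run in the ord-range 65..122); simpler, same cost.


-- ===== PORT A =====
-- ord(c) >= ord("A") and ord(c) <= ord("z")
def goPred (c : Char) : Bool := decide ('A'.toNat ≤ c.toNat) && decide (c.toNat ≤ 'z'.toNat)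

-- one iteration of A's for-loop; state = (mutable list s, instring, loc).
-- the read s[i] uses getD: i ranges over range(len(s)) so it is always in range.
def goStep (st : List Char × Bool × Nat) (i : Nat) : List Char × Bool × Nat :=
  let c := st.1.getD i ' '
  if goPred c then
    if !st.2.1 then (st.1.set st.2.2 c, true, st.2.2 + 1)
    else (st.1, true, st.2.2)
  else (st.1, false, st.2.2)

def go (s : String) : String :=
  let s0 := s.toList
  let res := (List.range s0.length).foldl goStep (s0, false, 0)
  -- " ".join(s[:loc]) on a list of single characters
  String.mk (List.intersperse ' ' (res.1.take res.2.2))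

-- ===== PORT B =====
-- run-skipping scan: take the first char of each alphabetic-range run, skip the run
def goCollect : List Char → List Char
  | [] => []
  | c :: t =>
    if goPred c then c :: goCollect (t.dropWhile (fun x => goPred x))
    else goCollect (t.dropWhile (fun x => !goPred x))
termination_by l => l.length
decreasing_by
  · exact Nat.lt_succ_of_le (t.length_dropWhile_le _)
  · exact Nat.lt_succ_of_le (t.length_dropWhile_le _)

def go_alt (s : String) : String :=
  String.mk (List.intersperse ' ' (goCollect s.toList))

-- ===== PRECONDITION & SPEC =====
def Spec_go (s : String) (out : String) : Prop := out = go_alt s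
instance (s : String) (out : String) : Decidable (Spec_go s out) := by unfold Spec_go; infer_instance

-- ===== CLAIM (what is proved, stated in full; the proofs are below) =====
def Claim_equal_go : Prop := ∀ (s : String), Dom_go s → Spec_go s (go s)

-- ===== LEMMAS AND PROOFS =====

-- pure (non-mutating) flag scan, foldl form, accumulator holds the firsts collected so far
def Facc (st : List Char × Bool) (c : Char) : List Char × Bool :=
  if goPred c then (if st.2 then st.1 else st.1 ++ [c], true) else (st.1, false)

-- pure flag scan, recursive form
def Frec (ins : Bool) : List Char → List Char
  | [] => []
  | c :: t => if goPred c then (if ins then Frec true t else c :: Frec true t) else Frec false t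

lemma foldl_Facc (l : List Char) : ∀ (acc : List Char) (ins : Bool),
    (l.foldl Facc (acc, ins)).1 = acc ++ Frec ins l := by
  induction l with
  | nil => intro acc ins; simp [Frec]
  | cons c t ih =>
    intro acc ins
    by_cases h : goPred c = true <;> by_cases hi : ins = true <;>
      simp [Facc, Frec, h, hi, ih]

lemma Frec_true (l : List Char) : Frec true l = Frec false (l.dropWhile (fun x => goPred x)) := by
  induction l with
  | nil => simp [Frec]
  | cons c t ih =>
    by_cases h : goPred c = true <;> simp [Frec, List.dropWhile, h, ih]

lemma Frec_false_drop (l : List Char) :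
    Frec false (l.dropWhile (fun x => !goPred x)) = Frec false l := by
  induction l with
  | nil => simp
  | cons c t ih =>
    by_cases h : goPred c = true <;> simp [Frec, List.dropWhile, h, ih]

lemma Frec_eq_collect (l : List Char) : Frec false l = goCollect l := by
  induction l using goCollect.induct with
  | case1 => simp [Frec, goCollect]
  | case2 c t h ih => rw [goCollect, if_pos h, Frec, if_pos h, if_neg (by simp), Frec_true, ih]
  | case3 c t h ih =>
    rw [goCollect, if_neg h, Frec, if_neg h, ← Frec_false_drop t, ih]

-- writes strictly below the dropped prefix do not change it
lemma drop_set_of_lt {α : Type} (l : List α) (j : Nat) (v : α) (i : Nat) (h : j < i) :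
    (l.set j v).drop i = l.drop i := by
  apply List.ext_getElem?
  intro m
  rw [List.getElem?_drop, List.getElem?_drop, List.getElem?_set]
  rw [if_neg (by omega)]

lemma drop_succ_of_drop_eq {α : Type} {l1 l2 : List α} {i : Nat} (h : l1.drop i = l2.drop i) :
    l1.drop (i + 1) = l2.drop (i + 1) := by
  have := congrArg (List.drop 1) h
  rwa [List.drop_drop, List.drop_drop] at this

-- the invariant of A's loop after processing the first i indices: the tracked prefix
-- s[:loc] equals the pure flag scan of s0[:i], and the tail from i is still the input
lemma go_inv (s0 : List Char) : ∀ (i : Nat), i ≤ s0.length →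
    ∀ (st : List Char × Bool × Nat) (P : List Char × Bool),
    (List.range i).foldl goStep (s0, false, 0) = st →
    (s0.take i).foldl Facc ([], false) = P →
    st.1.length = s0.length ∧ st.2.2 ≤ i ∧ st.1.drop i = s0.drop i ∧
      st.2.1 = P.2 ∧ st.2.2 = P.1.length ∧ st.1.take st.2.2 = P.1 := by
  intro i
  induction i with
  | zero =>
    intro _ st P hst hP
    subst hst; subst hP
    simp
  | succ i ih =>
    intro hle st P hst hP
    have hi : i < s0.length := hle
    obtain ⟨hlen, hloc, hdrop, hflag, hlocP, htake⟩ := ih (Nat.le_of_lt hi) _ _ rfl rfl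
    rw [List.range_succ, List.foldl_append, List.foldl_cons, List.foldl_nil] at hst
    rw [List.take_add_one, List.getElem?_eq_getElem hi, Option.toList_some,
        List.foldl_append, List.foldl_cons, List.foldl_nil] at hP
    subst hst; subst hP
    clear ih
    generalize hq : (List.range i).foldl goStep (s0, false, 0) = q
      at hlen hloc hdrop hflag hlocP htake ⊢
    obtain ⟨arr, ins, loc⟩ := q
    generalize hp2 : (s0.take i).foldl Facc ([], false) = p at hflag hlocP htake ⊢
    obtain ⟨pl, pf⟩ := p
    simp only at hlen hloc hdrop hflag hlocP htake
    -- the read s[i] is the original character: position i was never written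
    have hread : arr.getD i ' ' = s0[i] := by
      have h1 : arr[i]? = s0[i]? := by
        have := congrArg (fun l => l[0]?) hdrop
        simpa [List.getElem?_drop] using this
      rw [List.getD_eq_getElem?_getD, h1, List.getElem?_eq_getElem hi]
      rfl
    subst hflag
    by_cases hp : goPred s0[i] = true <;>
      rcases Bool.eq_false_or_eq_true ins with hins | hins <;> subst hins <;>
      simp only [goStep, Facc, hread, hp, Bool.not_true, Bool.not_false, Bool.false_eq_true,
        if_true, if_false, true_and]
    -- pred true, instring true: nothing changes on either side
    · exact ⟨hlen, by omega, drop_succ_of_drop_eq hdrop, hlocP, htake⟩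
    -- pred true, instring false: write s0[i] at loc, loc += 1; accumulator appends s0[i]
    · have hlt : loc < arr.length := by rw [hlen]; omega
      have htk : (arr.set loc s0[i]).take (loc + 1) = pl ++ [s0[i]] := by
        rw [List.take_add_one, List.getElem?_set_eq_of_lt _ hlt, Option.toList_some,
          List.take_set, List.set_eq_of_length_le (by simp), htake]
      have hdr : (arr.set loc s0[i]).drop (i + 1) = s0.drop (i + 1) := by
        rw [drop_set_of_lt _ _ _ _ (by omega : loc < i + 1)]
        exact drop_succ_of_drop_eq hdrop
      exact ⟨by simp [hlen], by omega, hdr, by simp [hlocP], htk⟩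
    -- pred false: flag cleared on both sides, nothing written
    · exact ⟨hlen, by omega, drop_succ_of_drop_eq hdrop, hlocP, htake⟩
    · exact ⟨hlen, by omega, drop_succ_of_drop_eq hdrop, hlocP, htake⟩

lemma go_firsts (s0 : List Char) :
    (((List.range s0.length).foldl goStep (s0, false, 0)).1.take
      ((List.range s0.length).foldl goStep (s0, false, 0)).2.2) = goCollect s0 := by
  obtain ⟨-, -, -, -, -, htake⟩ := go_inv s0 s0.length (Nat.le_refl _) _ _ rfl rfl
  rw [htake, List.take_length, ← Frec_eq_collect]
  simpa using foldl_Facc s0 [] false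

-- ===== VERDICT (by name: the statement is the Claim_ definition above) =====
theorem go_spec : Claim_equal_go := by
  intro s _
  unfold Spec_go go go_alt
  simp only
  rw [go_firsts]
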